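-- pv_equiv track=rewrite | github.com/willasbery/vision-assist | algorithms/utilities/generate_testing_grids.py | get_affected_cells
-- ===== SOURCE A (Python) =====
-- GRID_SIZE = 20
--
-- def get_affected_cells(grid_x, grid_y, brush_size, grid_shape):
--     cells = []
--     offset = brush_size // 2
--
--     grid_index_x = grid_x // GRID_SIZE
--     grid_index_y = grid_y // GRID_SIZE
--
--     for dy in range(-offset, offset + 1):
--         for dx in range(-offset, offset + 1):
--             new_x = grid_index_x + dx
--             new_y = grid_index_y + dy
--             if (0 <= new_x < grid_shape[1] and 0 <= new_y < grid_shape[0]):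
--                 cells.append((new_x, new_y))
--
--     return cells
-- ===== SOURCE B (Python) =====
-- GRID_SIZE = 20
--
-- def get_affected_cells(grid_x, grid_y, brush_size, grid_shape):
--     offset = brush_size // 2
--     gx = grid_x // GRID_SIZE
--     gy = grid_y // GRID_SIZE
--     x_lo = max(0, gx - offset)
--     x_hi = min(grid_shape[1] - 1, gx + offset)
--     y_lo = max(0, gy - offset)
--     y_hi = min(grid_shape[0] - 1, gy + offset)
--     cells = []
--     for ny in range(y_lo, y_hi + 1):
--         for nx in range(x_lo, x_hi + 1):
--             cells.append((nx, ny))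
--     return cells
-- ===== Notes on version B (the rewrite author's own statement) =====
-- stated objective: alternative
-- what changed: Instead of scanning the full (2*offset+1)^2 brush square and bounds-checking every cell, B clamps the x and y index ranges to the grid up front and emits the cells with two unconditional loops over the intersection only.
import Mathlib
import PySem

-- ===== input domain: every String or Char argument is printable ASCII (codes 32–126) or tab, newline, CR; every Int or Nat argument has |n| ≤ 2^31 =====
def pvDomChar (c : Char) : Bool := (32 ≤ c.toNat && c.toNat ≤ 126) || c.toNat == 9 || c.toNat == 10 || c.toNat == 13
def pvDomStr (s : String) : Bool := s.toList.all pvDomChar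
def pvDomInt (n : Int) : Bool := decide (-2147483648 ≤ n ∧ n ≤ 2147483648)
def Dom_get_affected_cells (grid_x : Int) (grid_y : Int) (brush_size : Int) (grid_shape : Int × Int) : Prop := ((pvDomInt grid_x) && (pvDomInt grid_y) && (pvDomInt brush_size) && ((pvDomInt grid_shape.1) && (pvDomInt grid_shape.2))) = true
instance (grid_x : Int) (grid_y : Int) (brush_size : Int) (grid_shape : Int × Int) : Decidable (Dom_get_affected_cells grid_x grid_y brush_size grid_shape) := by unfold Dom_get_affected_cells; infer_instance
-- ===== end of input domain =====

-- B replaces A's full brush-square scan with a per-cell bounds check by clamped index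
-- ranges emitted unconditionally (alternative decomposition: no inner branch, only
-- in-bounds cells are visited).

-- ===== PORT A =====
def get_affected_cells (grid_x : Int) (grid_y : Int) (brush_size : Int) (grid_shape : Int × Int) : List (Int × Int) :=
  let offset := PySem.Int.floordiv brush_size 2
  let grid_index_x := PySem.Int.floordiv grid_x 20
  let grid_index_y := PySem.Int.floordiv grid_y 20
  (PySem.List.pyRange (-offset) (offset + 1) 1).foldl (fun cells dy =>
    (PySem.List.pyRange (-offset) (offset + 1) 1).foldl (fun cells dx =>
      if 0 ≤ grid_index_x + dx ∧ grid_index_x + dx < grid_shape.2 ∧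
         0 ≤ grid_index_y + dy ∧ grid_index_y + dy < grid_shape.1 then
        cells ++ [(grid_index_x + dx, grid_index_y + dy)]
      else cells) cells) []

-- ===== PORT B =====
def get_affected_cells_alt (grid_x : Int) (grid_y : Int) (brush_size : Int) (grid_shape : Int × Int) : List (Int × Int) :=
  let offset := PySem.Int.floordiv brush_size 2
  let gx := PySem.Int.floordiv grid_x 20
  let gy := PySem.Int.floordiv grid_y 20
  let x_lo := max 0 (gx - offset)
  let x_hi := min (grid_shape.2 - 1) (gx + offset)
  let y_lo := max 0 (gy - offset)
  let y_hi := min (grid_shape.1 - 1) (gy + offset)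
  (PySem.List.pyRange y_lo (y_hi + 1) 1).foldl (fun cells ny =>
    (PySem.List.pyRange x_lo (x_hi + 1) 1).foldl (fun cells nx =>
      cells ++ [(nx, ny)]) cells) []

-- ===== PRECONDITION & SPEC =====
def Spec_get_affected_cells (grid_x : Int) (grid_y : Int) (brush_size : Int) (grid_shape : Int × Int) (out : List (Int × Int)) : Prop := out = get_affected_cells_alt grid_x grid_y brush_size grid_shape
instance (grid_x : Int) (grid_y : Int) (brush_size : Int) (grid_shape : Int × Int) (out : List (Int × Int)) : Decidable (Spec_get_affected_cells grid_x grid_y brush_size grid_shape out) := by unfold Spec_get_affected_cells; infer_instance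

-- ===== CLAIM (what is proved, stated in full; the proofs are below) =====
def Claim_equal_get_affected_cells : Prop := ∀ (grid_x : Int) (grid_y : Int) (brush_size : Int) (grid_shape : Int × Int), Dom_get_affected_cells grid_x grid_y brush_size grid_shape → Spec_get_affected_cells grid_x grid_y brush_size grid_shape (get_affected_cells grid_x grid_y brush_size grid_shape)

-- ===== LEMMAS AND PROOFS =====

-- Filtering an integer range by membership in [lo, hi) is the clamped range.
theorem filter_pyRange_interval (a b lo hi : Int) :
    (PySem.List.pyRange a b 1).filter (fun x => decide (lo ≤ x ∧ x < hi)) =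
      PySem.List.pyRange (max a lo) (min b hi) 1 := by
  by_cases hab : b ≤ a
  · rw [PySem.List.pyRange_one_eq_nil hab, PySem.List.pyRange_one_eq_nil (by omega)]
    rfl
  · rw [PySem.List.pyRange_one_cons (by omega : a < b)]
    rw [List.filter_cons]
    by_cases hx : lo ≤ a ∧ a < hi
    · simp only [hx, decide_true, and_self, if_true]
      rw [filter_pyRange_interval (a + 1) b lo hi]
      rw [PySem.List.pyRange_one_cons (show max a lo < min b hi by omega)]
      rw [show max a lo = a by omega, show max (a + 1) lo = a + 1 by omega]
    · simp only [decide_eq_true_eq, hx, if_false]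
      rw [filter_pyRange_interval (a + 1) b lo hi]
      by_cases hlo : a < lo
      · rw [show max (a + 1) lo = max a lo by omega]
      · -- here hi ≤ a : both ranges are empty
        have hhi : hi ≤ a := by omega
        rw [PySem.List.pyRange_one_eq_nil (by omega), PySem.List.pyRange_one_eq_nil (by omega)]
termination_by (b - a).toNat
decreasing_by all_goals omega

-- Shifting an integer range.
theorem map_add_pyRange (c a b : Int) :
    (PySem.List.pyRange a b 1).map (fun x => c + x) = PySem.List.pyRange (c + a) (c + b) 1 := by
  rw [PySem.List.pyRange_one, PySem.List.pyRange_one, List.map_map]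
  rw [show c + b - (c + a) = b - a by ring]
  refine List.map_congr_left fun k _ => ?_
  simp only [Function.comp_apply]; ring

-- flatMap over a guarded body is flatMap over the filtered list.
theorem flatMap_ite {α β : Type} (l : List α) (p : α → Prop) [DecidablePred p] (g : α → List β) :
    (l.flatMap fun x => if p x then g x else []) = (l.filter fun x => decide (p x)).flatMap g := by
  induction l with
  | nil => rfl
  | cons x xs ih =>
    rw [List.flatMap_cons, List.filter_cons]
    by_cases hx : p x
    · simp [hx, ih]
    · simp [hx, ih]

-- flatMap over a shifted integer range.
theorem flatMap_pyRange_shift {β : Type} (c a b : Int) (g : Int → List β) :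
    (PySem.List.pyRange a b 1).flatMap (fun x => g (c + x)) =
      (PySem.List.pyRange (c + a) (c + b) 1).flatMap g := by
  rw [← map_add_pyRange, List.flatMap_map]

theorem get_affected_cells_eq_alt (grid_x : Int) (grid_y : Int) (brush_size : Int) (grid_shape : Int × Int) :
    get_affected_cells grid_x grid_y brush_size grid_shape =
      get_affected_cells_alt grid_x grid_y brush_size grid_shape := by
  unfold get_affected_cells get_affected_cells_alt
  set o := PySem.Int.floordiv brush_size 2 with ho
  set gx := PySem.Int.floordiv grid_x 20 with hgx
  set gy := PySem.Int.floordiv grid_y 20 with hgy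
  obtain ⟨H, W⟩ := grid_shape
  simp only [PySem.List.foldl_append_ite, PySem.List.foldl_append_singleton_eq_map,
    PySem.List.foldl_append_eq_flatMap, List.nil_append]
  -- Rewrite each row of A's flatMap into a guarded clamped row.
  have hrow : ∀ dy : Int,
      ((PySem.List.pyRange (-o) (o + 1) 1).filter
          (fun dx => decide (0 ≤ gx + dx ∧ gx + dx < W ∧ 0 ≤ gy + dy ∧ gy + dy < H))).map
        (fun dx => (gx + dx, gy + dy)) =
      if 0 ≤ gy + dy ∧ gy + dy < H then
        (PySem.List.pyRange (max 0 (gx - o)) (min (W - 1) (gx + o) + 1) 1).map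
          (fun nx => (nx, gy + dy))
      else [] := by
    intro dy
    by_cases hy : 0 ≤ gy + dy ∧ gy + dy < H
    · rw [if_pos hy]
      have hfc : ((PySem.List.pyRange (-o) (o + 1) 1).filter
            (fun dx => decide (0 ≤ gx + dx ∧ gx + dx < W ∧ 0 ≤ gy + dy ∧ gy + dy < H))) =
          (PySem.List.pyRange (-o) (o + 1) 1).filter
            (fun dx => decide (-gx ≤ dx ∧ dx < W - gx)) := by
        refine List.filter_congr fun dx _ => ?_
        apply decide_eq_decide.mpr
        constructor <;> intro h <;> omega
      rw [hfc, filter_pyRange_interval]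
      have hcomp : (fun dx : Int => ((gx + dx, gy + dy) : Int × Int)) =
          (fun nx : Int => ((nx, gy + dy) : Int × Int)) ∘ (fun dx => gx + dx) := rfl
      rw [hcomp, ← List.map_map, map_add_pyRange]
      rw [show gx + max (-o) (-gx) = max 0 (gx - o) by omega,
        show gx + min (o + 1) (W - gx) = min (W - 1) (gx + o) + 1 by omega]
    · rw [if_neg hy]
      rw [List.filter_eq_nil_iff.mpr, List.map_nil]
      intro dx _
      simp only [decide_eq_true_eq]
      omega
  simp only [hrow]
  rw [flatMap_ite (p := fun dy => 0 ≤ gy + dy ∧ gy + dy < H)]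
  have hfy : ((PySem.List.pyRange (-o) (o + 1) 1).filter
        (fun dy => decide (0 ≤ gy + dy ∧ gy + dy < H))) =
      (PySem.List.pyRange (-o) (o + 1) 1).filter
        (fun dy => decide (-gy ≤ dy ∧ dy < H - gy)) := by
    refine List.filter_congr fun dy _ => ?_
    apply decide_eq_decide.mpr
    constructor <;> intro h <;> omega
  rw [hfy, filter_pyRange_interval]
  rw [flatMap_pyRange_shift gy (max (-o) (-gy)) (min (o + 1) (H - gy))
    (fun ny => (PySem.List.pyRange (max 0 (gx - o)) (min (W - 1) (gx + o) + 1) 1).map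
      (fun nx => ((nx, ny) : Int × Int)))]
  rw [show gy + max (-o) (-gy) = max 0 (gy - o) by omega,
    show gy + min (o + 1) (H - gy) = min (H - 1) (gy + o) + 1 by omega]

-- ===== VERDICT (by name: the statement is the Claim_ definition above) =====
theorem get_affected_cells_spec : Claim_equal_get_affected_cells := by
  intro grid_x grid_y brush_size grid_shape _
  unfold Spec_get_affected_cells
  exact get_affected_cells_eq_alt grid_x grid_y brush_size grid_shape
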